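-- pv_equiv track=rewrite | github.com/namel3ss-Ai/namel3ss | src/namel3ss/runtime/ui/state/chat_shell.py | _slug_text
-- ===== SOURCE A (Python) =====
-- def _slug_text(value: str | None) -> str:
--     if value is None:
--         return ""
--     allowed: list[str] = []
--     last_dot = False
--     for char in value.lower():
--         if char.isalnum():
--             allowed.append(char)
--             last_dot = False
--             continue
--         if last_dot:
--             continue
--         allowed.append(".")
--         last_dot = True
--     slug = "".join(allowed).strip(".")
--     return slug
-- ===== SOURCE B (Python) =====
-- def _slug_text(value):
--     if value is None:
--         return ""
--     tokens = []
--     cur = []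
--     for ch in value.lower():
--         if ch.isalnum():
--             cur.append(ch)
--         elif cur:
--             tokens.append("".join(cur))
--             cur = []
--     if cur:
--         tokens.append("".join(cur))
--     return ".".join(tokens)
-- ===== Notes on version B (the rewrite author's own statement) =====
-- stated objective: simpler
-- what changed: B tokenizes the lowered string into maximal alphanumeric runs and joins them with '.', instead of emitting separator dots under a last_dot flag and stripping leading/trailing dots afterwards.
import Mathlib
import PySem

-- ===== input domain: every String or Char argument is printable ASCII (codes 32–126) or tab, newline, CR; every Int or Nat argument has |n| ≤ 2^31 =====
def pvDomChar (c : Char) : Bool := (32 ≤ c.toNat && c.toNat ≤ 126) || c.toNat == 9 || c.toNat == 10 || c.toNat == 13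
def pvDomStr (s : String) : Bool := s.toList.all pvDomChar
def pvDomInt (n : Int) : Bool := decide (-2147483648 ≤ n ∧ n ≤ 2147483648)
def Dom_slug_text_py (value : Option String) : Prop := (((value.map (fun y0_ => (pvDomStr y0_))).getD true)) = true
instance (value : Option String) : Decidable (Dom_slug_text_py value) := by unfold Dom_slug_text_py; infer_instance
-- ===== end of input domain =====

-- B tokenizes the lowered string into maximal alphanumeric runs and joins them with '.', instead of
-- emitting separator dots under a last_dot flag and stripping them afterwards (same cost, simpler).

-- ===== PORT A =====
-- loop body of A: state = (allowed, last_dot)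
def stepA (st : List String × Bool) (char : Char) : List String × Bool :=
  if PySem.Chars.isalnum char then (st.1 ++ [String.ofList [char]], false)
  else if st.2 then st
  else (st.1 ++ ["."], true)

def slug_text_py (value : Option String) : String :=
  match value with
  | none => ""
  | some v =>
    PySem.Str.stripChars
      (PySem.Str.join "" ((PySem.Str.lower v).toList.foldl stepA ([], false)).1) "."

-- ===== PORT B =====
-- loop body of B: state = (tokens, cur)
def stepB (st : List String × List Char) (ch : Char) : List String × List Char :=
  if PySem.Chars.isalnum ch then (st.1, st.2 ++ [ch])
  else if st.2 ≠ [] then (st.1 ++ [String.ofList st.2], [])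
  else st

-- the post-loop flush of `cur`
def finishB (st : List String × List Char) : List String :=
  if st.2 ≠ [] then st.1 ++ [String.ofList st.2] else st.1

def slug_text_py_alt (value : Option String) : String :=
  match value with
  | none => ""
  | some v =>
    PySem.Str.join "." (finishB ((PySem.Str.lower v).toList.foldl stepB ([], [])))

-- ===== PRECONDITION & SPEC =====
def Spec_slug_text_py (value : Option String) (out : String) : Prop := out = slug_text_py_alt value
instance (value : Option String) (out : String) : Decidable (Spec_slug_text_py value out) := by unfold Spec_slug_text_py; infer_instance

-- ===== CLAIM (what is proved, stated in full; the proofs are below) =====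
def Claim_equal_slug_text_py : Prop := ∀ (value : Option String), Dom_slug_text_py value → Spec_slug_text_py value (slug_text_py value)

-- ===== LEMMAS AND PROOFS =====

-- A's emitted characters for the remaining input, given the last_dot flag.
def fA : List Char → Bool → List Char
  | [], _ => []
  | c :: cs, ld =>
    if PySem.Chars.isalnum c then c :: fA cs false
    else if ld then fA cs ld
    else '.' :: fA cs true

-- B's final token list (maximal alnum runs), given the current run accumulator.
def runsR : List Char → List Char → List (List Char)
  | [], cur => if cur = [] then [] else [cur]
  | c :: cs, cur =>
    if PySem.Chars.isalnum c then runsR cs (cur ++ [c])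
    else if cur = [] then runsR cs []
    else cur :: runsR cs []

-- trailing dot A emits after the last run (if the string ends non-alphanumeric)
def trD (cs : List Char) : List Char :=
  match cs.getLast? with
  | some c => if PySem.Chars.isalnum c then [] else ['.']
  | none => []

lemma loopA (cs : List Char) : ∀ (acc : List String) (ld : Bool),
    (cs.foldl stepA (acc, ld)).1 = acc ++ (fA cs ld).map (fun c => String.ofList [c]) := by
  induction cs with
  | nil => intro acc ld; simp [fA]
  | cons c cs ih =>
    intro acc ld
    by_cases h : PySem.Chars.isalnum c = true
    · simp [stepA, fA, h, ih]
    · cases ld with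
      | false => simp [stepA, fA, h, ih]
      | true => simp [stepA, fA, h, ih]

lemma loopB (cs : List Char) : ∀ (toks : List String) (cur : List Char),
    finishB (cs.foldl stepB (toks, cur)) = toks ++ (runsR cs cur).map String.ofList := by
  induction cs with
  | nil =>
    intro toks cur
    by_cases h : cur = [] <;> simp [finishB, runsR, h]
  | cons c cs ih =>
    intro toks cur
    by_cases h : PySem.Chars.isalnum c = true
    · simp [stepB, runsR, h, ih]
    · by_cases hc : cur = []
      · simp [stepB, runsR, h, hc, ih]
      · simp [stepB, runsR, h, hc, ih]

lemma runsR_ne_nil (cs : List Char) : ∀ (cur : List Char), cur ≠ [] → runsR cs cur ≠ [] := by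
  induction cs with
  | nil => intro cur h; simp [runsR, h]
  | cons c cs ih =>
    intro cur h
    by_cases ha : PySem.Chars.isalnum c = true
    · simpa [runsR, ha] using ih (cur ++ [c]) (by simp)
    · simp [runsR, ha, h]

lemma runsR_nil_all_not (cs : List Char) (h : runsR cs [] = []) :
    ∀ c ∈ cs, PySem.Chars.isalnum c = false := by
  induction cs with
  | nil => simp
  | cons c cs ih =>
    by_cases ha : PySem.Chars.isalnum c = true
    · exact absurd h (by simpa [runsR, ha] using runsR_ne_nil cs [c] (by simp))
    · simp only [runsR, ha] at h
      intro x hx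
      rcases List.mem_cons.mp hx with rfl | hx
      · simpa using ha
      · exact ih (by simpa using h) x hx

lemma runsR_good (cs : List Char) : ∀ (cur : List Char),
    (∀ c ∈ cur, PySem.Chars.isalnum c = true) →
    ∀ r ∈ runsR cs cur, r ≠ [] ∧ ∀ c ∈ r, PySem.Chars.isalnum c = true := by
  induction cs with
  | nil =>
    intro cur hcur r hr
    by_cases h : cur = [] <;> simp [runsR, h] at hr
    subst hr; exact ⟨h, hcur⟩
  | cons c cs ih =>
    intro cur hcur r hr
    by_cases ha : PySem.Chars.isalnum c = true
    · refine ih (cur ++ [c]) ?_ r (by simpa [runsR, ha] using hr)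
      intro x hx; rcases List.mem_append.mp hx with hx | hx
      · exact hcur x hx
      · simp at hx; subst hx; exact ha
    · by_cases hc : cur = []
      · exact ih [] (by simp) r (by simpa [runsR, ha, hc] using hr)
      · simp only [runsR, ha, if_neg hc] at hr
        rcases List.mem_cons.mp hr with rfl | hr
        · exact ⟨hc, hcur⟩
        · exact ih [] (by simp) r hr

lemma trD_cons (c : Char) (cs : List Char) (h : cs ≠ []) : trD (c :: cs) = trD cs := by
  cases cs with
  | nil => exact absurd rfl h
  | cons d ds => simp [trD, List.getLast?_cons_cons]

lemma trD_single (c : Char) : trD [c] = if PySem.Chars.isalnum c then [] else ['.'] := rfl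

lemma trD_of_last_not (cs : List Char) (h : cs ≠ [])
    (hall : ∀ c ∈ cs, PySem.Chars.isalnum c = false) : trD cs = ['.'] := by
  cases hx : cs.getLast? with
  | none => exact absurd (List.getLast?_eq_none_iff.mp hx) h
  | some x => simp [trD, hx, hall x (List.mem_of_getLast? hx)]

lemma stripChars_eq (s : List Char) :
    PySem.Chars.stripChars s ['.']
      = (List.dropWhile (fun c => (['.'] : List Char).contains c)
          ((List.dropWhile (fun c => (['.'] : List Char).contains c) s).reverse)).reverse := rfl

lemma join_cons_ne (d x : List Char) (rs : List (List Char)) (h : rs ≠ []) :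
    PySem.Chars.join d (x :: rs) = x ++ d ++ PySem.Chars.join d rs := by
  cases rs with
  | nil => exact absurd rfl h
  | cons y ys => exact PySem.Chars.join_cons_cons d x y ys

-- KEY: both characterizations of A's output against B's runs, proved jointly by induction.
lemma key (cs : List Char) :
    (∀ (cur : List Char), cur ≠ [] →
      cur ++ fA cs false = PySem.Chars.join ['.'] (runsR cs cur) ++ trD cs) ∧
    (fA cs true = PySem.Chars.join ['.'] (runsR cs []) ++
      (if runsR cs [] = [] then [] else trD cs)) := by
  induction cs with
  | nil =>
    constructor
    · intro cur h
      simp [fA, runsR, h, PySem.Chars.join_singleton, trD]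
    · simp [fA, runsR, PySem.Chars.join_nil]
  | cons c cs ih =>
    obtain ⟨ih1, ih2⟩ := ih
    by_cases ha : PySem.Chars.isalnum c = true
    · constructor
      · intro cur h
        rw [show fA (c :: cs) false = c :: fA cs false from by simp [fA, ha],
            show runsR (c :: cs) cur = runsR cs (cur ++ [c]) from by simp [runsR, ha]]
        by_cases hcs : cs = []
        · subst hcs
          simp [fA, runsR, PySem.Chars.join_singleton, trD_single, ha]
        · rw [trD_cons c cs hcs]
          calc cur ++ c :: fA cs false = (cur ++ [c]) ++ fA cs false := by simp
          _ = _ := ih1 (cur ++ [c]) (by simp)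
      · have hne : runsR cs [c] ≠ [] := runsR_ne_nil cs [c] (by simp)
        rw [show fA (c :: cs) true = c :: fA cs false from by simp [fA, ha],
            show runsR (c :: cs) [] = runsR cs [c] from by simp [runsR, ha],
            if_neg hne]
        by_cases hcs : cs = []
        · subst hcs
          simp [fA, runsR, PySem.Chars.join_singleton, trD_single, ha]
        · rw [trD_cons c cs hcs]
          simpa using ih1 [c] (by simp)
    · constructor
      · intro cur h
        rw [show fA (c :: cs) false = '.' :: fA cs true from by simp [fA, ha],
            show runsR (c :: cs) cur = cur :: runsR cs [] from by simp [runsR, ha, h]]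
        by_cases hr : runsR cs [] = []
        · have htr : trD (c :: cs) = ['.'] := by
            refine trD_of_last_not _ (by simp) ?_
            intro x hx
            rcases List.mem_cons.mp hx with rfl | hx
            · simpa using ha
            · exact runsR_nil_all_not cs hr x hx
          rw [htr, hr, PySem.Chars.join_singleton, ih2, hr, PySem.Chars.join_nil, if_pos rfl]
          simp
        · rw [join_cons_ne _ _ _ hr, ih2, if_neg hr,
              trD_cons c cs (by rintro rfl; simp [runsR] at hr)]
          simp
      · rw [show fA (c :: cs) true = fA cs true from by simp [fA, ha],
            show runsR (c :: cs) [] = runsR cs [] from by simp [runsR, ha]]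
        by_cases hr : runsR cs [] = []
        · rw [ih2, hr]; simp
        · rw [ih2, if_neg hr, if_neg hr,
              trD_cons c cs (by rintro rfl; simp [runsR] at hr)]

lemma pd_of_alnum (c : Char) (h : PySem.Chars.isalnum c = true) :
    (['.'] : List Char).contains c = false := by
  by_cases hc : c = '.'
  · subst hc; exact absurd h (by decide)
  · simp [List.contains_eq_mem, hc]

lemma dropWhile_dots (l x : List Char) (h : ∀ c ∈ l, c = '.') :
    List.dropWhile (fun c => (['.'] : List Char).contains c) (l ++ x)
      = List.dropWhile (fun c => (['.'] : List Char).contains c) x := by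
  induction l with
  | nil => rfl
  | cons a l ih =>
    have ha : a = '.' := h a (by simp)
    subst ha
    rw [List.cons_append, List.dropWhile_cons_of_pos (by decide)]
    exact ih (fun c hc => h c (by simp [hc]))

lemma join_head (rs : List (List Char))
    (hg : ∀ r ∈ rs, r ≠ [] ∧ ∀ c ∈ r, PySem.Chars.isalnum c = true) (h : rs ≠ []) :
    ∃ c rest, PySem.Chars.join ['.'] rs = c :: rest ∧ PySem.Chars.isalnum c = true := by
  cases rs with
  | nil => exact absurd rfl h
  | cons r rs =>
    obtain ⟨hne, hal⟩ := hg r (by simp)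
    cases r with
    | nil => exact absurd rfl hne
    | cons c r' =>
      cases rs with
      | nil =>
        exact ⟨c, r', by rw [PySem.Chars.join_singleton], hal c (by simp)⟩
      | cons s ss =>
        refine ⟨c, r' ++ ['.'] ++ PySem.Chars.join ['.'] (s :: ss), ?_, hal c (by simp)⟩
        rw [PySem.Chars.join_cons_cons]; simp

lemma join_getLast (rs : List (List Char))
    (hg : ∀ r ∈ rs, r ≠ [] ∧ ∀ c ∈ r, PySem.Chars.isalnum c = true) (h : rs ≠ []) :
    ∃ c, (PySem.Chars.join ['.'] rs).getLast? = some c ∧ PySem.Chars.isalnum c = true := by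
  induction rs with
  | nil => exact absurd rfl h
  | cons r rs ih =>
    by_cases hrs : rs = []
    · subst hrs
      obtain ⟨hne, hal⟩ := hg r (by simp)
      refine ⟨r.getLast hne, ?_, hal _ (List.getLast_mem hne)⟩
      rw [PySem.Chars.join_singleton, List.getLast?_eq_some_getLast hne]
    · have hg' : ∀ x ∈ rs, x ≠ [] ∧ ∀ c ∈ x, PySem.Chars.isalnum c = true :=
        fun x hx => hg x (by simp [hx])
      obtain ⟨c, hc, hal⟩ := ih hg' hrs
      refine ⟨c, ?_, hal⟩
      have hjne : PySem.Chars.join ['.'] rs ≠ [] := by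
        obtain ⟨d, rest, he, _⟩ := join_head rs hg' hrs
        simp [he]
      rw [join_cons_ne _ _ _ hrs, List.getLast?_append, List.getLast?_append, hc]
      rfl

-- the central strip lemma: dots around a join of alnum runs strip away exactly.
lemma strip_sandwich (rs : List (List Char)) (l t : List Char)
    (hg : ∀ r ∈ rs, r ≠ [] ∧ ∀ c ∈ r, PySem.Chars.isalnum c = true)
    (hl : ∀ c ∈ l, c = '.') (ht : ∀ c ∈ t, c = '.') :
    PySem.Chars.stripChars (l ++ PySem.Chars.join ['.'] rs ++ t) ['.']
      = PySem.Chars.join ['.'] rs := by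
  by_cases h : rs = []
  · subst h
    rw [PySem.Chars.join_nil]
    rw [List.append_nil, stripChars_eq,
        show l ++ t = l ++ (t ++ []) from by simp,
        dropWhile_dots l _ hl, dropWhile_dots t [] ht]
    rfl
  · obtain ⟨c, rest, he, hc⟩ := join_head rs hg h
    obtain ⟨z, hz, hzal⟩ := join_getLast rs hg h
    rw [stripChars_eq, List.append_assoc, dropWhile_dots l _ hl]
    rw [show PySem.Chars.join ['.'] rs ++ t = c :: (rest ++ t) from by rw [he]; simp]
    rw [List.dropWhile_cons_of_neg (by rw [pd_of_alnum c hc]; simp)]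
    rw [show c :: (rest ++ t) = (c :: rest) ++ t from by simp, ← he]
    rw [List.reverse_append, dropWhile_dots t.reverse _ (fun x hx => ht x (by simpa using hx))]
    have hrev : (PySem.Chars.join ['.'] rs).reverse.head? = some z := by
      rw [List.head?_reverse, hz]
    cases hr : (PySem.Chars.join ['.'] rs).reverse with
    | nil => simp [hr] at hrev
    | cons a as =>
      rw [hr] at hrev
      simp only [List.head?_cons, Option.some.injEq] at hrev
      subst hrev
      rw [List.dropWhile_cons_of_neg (by rw [pd_of_alnum a hzal]; simp)]
      rw [← hr, List.reverse_reverse]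

-- main equality on character lists
lemma main_chars (cs : List Char) :
    PySem.Chars.stripChars (fA cs false) ['.'] = PySem.Chars.join ['.'] (runsR cs []) := by
  obtain ⟨key1, key2⟩ := key cs
  have hgood := runsR_good cs [] (by simp)
  cases cs with
  | nil => rfl
  | cons c cs' =>
    by_cases ha : PySem.Chars.isalnum c = true
    · have hne : runsR (c :: cs') [] ≠ [] := by
        simpa [runsR, ha] using runsR_ne_nil cs' [c] (by simp)
      have hfa : fA (c :: cs') false = fA (c :: cs') true := by simp [fA, ha]
      rw [hfa, key2, if_neg hne]
      have htr : ∀ x ∈ trD (c :: cs'), x = '.' := by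
        unfold trD
        intro x hx
        rcases hl : (c :: cs').getLast? with _ | y <;> rw [hl] at hx
        · simp at hx
        · by_cases hy : PySem.Chars.isalnum y = true <;> simp [hy] at hx
          exact hx
      simpa using strip_sandwich (runsR (c :: cs') []) [] (trD (c :: cs')) hgood (by simp) htr
    · rw [show fA (c :: cs') false = '.' :: fA cs' true from by simp [fA, ha],
          show runsR (c :: cs') [] = runsR cs' [] from by simp [runsR, ha]]
      obtain ⟨_, key2'⟩ := key cs'
      rw [key2']
      have hgood' := runsR_good cs' [] (by simp)
      by_cases hr : runsR cs' [] = []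
      · rw [hr, PySem.Chars.join_nil, if_pos rfl]
        rfl
      · rw [if_neg hr]
        have htr : ∀ x ∈ trD cs', x = '.' := by
          unfold trD
          intro x hx
          rcases hl : cs'.getLast? with _ | y <;> rw [hl] at hx
          · simp at hx
          · by_cases hy : PySem.Chars.isalnum y = true <;> simp [hy] at hx
            exact hx
        simpa using strip_sandwich (runsR cs' []) ['.'] (trD cs') hgood' (by simp) htr

lemma toList_empty : ("" : String).toList = [] := rfl

lemma toList_dot : ("." : String).toList = ['.'] := rfl

-- ===== VERDICT (by name: the statement is the Claim_ definition above) =====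
theorem slug_text_py_spec : Claim_equal_slug_text_py := by
  intro value _
  unfold Spec_slug_text_py
  cases value with
  | none => rfl
  | some v =>
    show PySem.Str.stripChars _ _ = PySem.Str.join _ _
    apply congrArg String.ofList
    rw [PySem.Str.toList_join, toList_dot, toList_empty]
    rw [loopA _ [] false, loopB _ [] []]
    rw [show (([] : List String) ++ ((fA (PySem.Str.lower v).toList false).map (fun c => String.ofList [c])))
          = (fA (PySem.Str.lower v).toList false).map (fun c => String.ofList [c]) from by simp]
    rw [show List.map String.toList ((fA (PySem.Str.lower v).toList false).map (fun c => String.ofList [c]))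
          = (fA (PySem.Str.lower v).toList false).map (fun c => [c]) from by simp]
    rw [PySem.Chars.join_nil_singletons]
    rw [show ([] : List String) ++ (runsR (PySem.Str.lower v).toList []).map String.ofList
          = (runsR (PySem.Str.lower v).toList []).map String.ofList from by simp]
    rw [show List.map String.toList ((runsR (PySem.Str.lower v).toList []).map String.ofList)
          = runsR (PySem.Str.lower v).toList [] from by simp [List.map_map, Function.comp_def]]
    exact main_chars _
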